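-- pv_equiv track=rewrite | github.com/PieroL1/AlgoritmosEvolutivos | Semana5/ejercicio5.py | calcular_huecos_y_continuo
-- ===== SOURCE A (Python) =====
-- franjas = ['F1', 'F2', 'F3', 'F4', 'F5', 'F6']
--
-- salas = [f'Sala{i+1}' for i in range(6)]
--
-- def calcular_huecos_y_continuo(asignacion):
--     # Para cada sala, obtener franjas asignadas (convertir F1..F6 a índices 0..5)
--     huecos_totales = 0
--     penalizacion_continuo = 0
--
--     franjas_idx = {f: i for i, f in enumerate(franjas)}
--
--     for sala in salas:
--         franjas_asignadas = [franjas_idx[fr] for (sal, fr) in asignacion if sal == sala]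
--         franjas_asignadas = sorted(franjas_asignadas)
--         if not franjas_asignadas:
--             continue
--         # Contar huecos (intervalos vacíos entre franjas asignadas)
--         for i in range(len(franjas_asignadas) - 1):
--             huecos = franjas_asignadas[i+1] - franjas_asignadas[i] - 1
--             huecos_totales += huecos
--
--         # Verificar si hay uso continuo > 4 franjas (horas)
--         # Buscamos la máxima secuencia consecutiva en franjas_asignadas
--         max_consecutivo = 1
--         contador = 1
--         for i in range(1, len(franjas_asignadas)):
--             if franjas_asignadas[i] == franjas_asignadas[i-1] + 1:
--                 contador += 1
--                 max_consecutivo = max(max_consecutivo, contador)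
--             else:
--                 contador = 1
--         if max_consecutivo > 4:
--             penalizacion_continuo += max_consecutivo - 4
--
--     return huecos_totales, penalizacion_continuo
-- ===== SOURCE B (Python) =====
-- franjas = ['F1', 'F2', 'F3', 'F4', 'F5', 'F6']
--
-- salas = [f'Sala{i+1}' for i in range(6)]
--
-- def calcular_huecos_y_continuo(asignacion):
--     # One grouping pass: bucket franja indices per known sala, then one scan per bucket.
--     idx = {f: i for i, f in enumerate(franjas)}
--     conocidas = set(salas)
--     buckets = {}
--     for sal, fr in asignacion:
--         if sal in conocidas:
--             buckets.setdefault(sal, []).append(idx[fr])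
--     huecos_totales = 0
--     penalizacion_continuo = 0
--     for sala in salas:
--         xs = sorted(buckets.get(sala, []))
--         if not xs:
--             continue
--         # telescoped gap count: sum of (next - cur - 1) over adjacent pairs
--         huecos_totales += xs[-1] - xs[0] - (len(xs) - 1)
--         run = best = 1
--         for prev, cur in zip(xs, xs[1:]):
--             if cur == prev + 1:
--                 run += 1
--                 if run > best:
--                     best = run
--             else:
--                 run = 1
--         if best > 4:
--             penalizacion_continuo += best - 4
--     return huecos_totales, penalizacion_continuo
-- ===== Notes on version B (the rewrite author's own statement) =====
-- stated objective: alternative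
-- what changed: B replaces A's six whole-list filter-and-rescan passes by a single grouping pass that buckets franja indices per known sala into a dict, and replaces A's per-sala gap-summation loop by the telescoped closed form last - first - (len-1).
import Mathlib
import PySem

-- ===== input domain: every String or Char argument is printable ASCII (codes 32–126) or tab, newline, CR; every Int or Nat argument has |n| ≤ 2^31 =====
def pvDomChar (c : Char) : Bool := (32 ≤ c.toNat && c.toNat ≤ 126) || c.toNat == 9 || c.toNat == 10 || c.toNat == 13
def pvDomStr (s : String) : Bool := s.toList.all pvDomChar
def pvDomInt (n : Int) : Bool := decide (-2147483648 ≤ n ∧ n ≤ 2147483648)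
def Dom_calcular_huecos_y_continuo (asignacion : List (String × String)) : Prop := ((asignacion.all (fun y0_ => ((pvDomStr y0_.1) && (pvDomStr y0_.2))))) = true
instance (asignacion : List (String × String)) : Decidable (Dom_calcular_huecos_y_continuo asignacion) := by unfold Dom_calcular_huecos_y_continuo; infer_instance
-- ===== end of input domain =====

-- B replaces A's six whole-list rescans by one grouping pass into a dict of per-sala
-- buckets and telescopes the gap sum into a closed form (objective: alternative).

-- module-level constants shared by both versions
def pvFranjas : List String := ["F1", "F2", "F3", "F4", "F5", "F6"]
def pvSalas : List String := (PySem.List.pyRange 0 6 1).map (fun i => "Sala" ++ PySem.Int.toStr (i + 1))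
-- franjas_idx = {f: i for i, f in enumerate(franjas)}  (same dict in both versions)
def pvFranjasIdx : PySem.Dict String Int :=
  (PySem.List.enumerate pvFranjas).foldl (fun d p => d.insert p.2 p.1) PySem.Dict.empty

-- ===== PORT A =====
-- loop body of A's 'for sala in salas' (state = (huecos_totales, penalizacion_continuo));
-- franjas_idx[fr] is ported as getD … 0: Pre_ guarantees the key is present.
def pvStepA (asignacion : List (String × String)) (st : Int × Int) (sala : String) : Int × Int :=
  let fa0 := (asignacion.filter (fun q => q.1 == sala)).map (fun q => pvFranjasIdx.getD q.2 0)
  let fa := PySem.List.sorted fa0 (fun x => x) false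
  if fa = [] then st
  else
    let h := (PySem.List.pyRange 0 ((fa.length : Int) - 1) 1).foldl
      (fun acc i => acc + (PySem.List.pyGetD fa (i + 1) 0 - PySem.List.pyGetD fa i 0 - 1)) st.1
    let mc := (PySem.List.pyRange 1 (fa.length : Int) 1).foldl
      (fun mc i => if PySem.List.pyGetD fa i 0 == PySem.List.pyGetD fa (i - 1) 0 + 1
        then (max mc.1 (mc.2 + 1), mc.2 + 1) else (mc.1, (1 : Int))) ((1 : Int), (1 : Int))
    (h, if mc.1 > 4 then st.2 + (mc.1 - 4) else st.2)

def calcular_huecos_y_continuo (asignacion : List (String × String)) : Int × Int :=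
  pvSalas.foldl (pvStepA asignacion) (0, 0)

-- ===== PORT B =====
-- grouping pass: buckets.setdefault(sal, []).append(idx[fr]) for every known sala
def pvBuckets (asignacion : List (String × String)) : PySem.Dict String (List Int) :=
  asignacion.foldl (fun d p =>
    if (PySem.Set.ofList pvSalas).contains p.1
    then d.modify p.1 [] (fun l => l ++ [pvFranjasIdx.getD p.2 0]) else d) PySem.Dict.empty

-- loop body of B's 'for sala in salas'; xs[1:] is xs.tail (slice from 1 on a list)
def pvStepB (buckets : PySem.Dict String (List Int)) (st : Int × Int) (sala : String) : Int × Int :=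
  let xs := PySem.List.sorted (buckets.getD sala []) (fun x => x) false
  if xs = [] then st
  else
    let h := st.1 + (PySem.List.pyGetD xs (-1) 0 - PySem.List.pyGetD xs 0 0 - ((xs.length : Int) - 1))
    let rb := (xs.zip xs.tail).foldl (fun rb p =>
        if p.2 == p.1 + 1 then (rb.1 + 1, if rb.1 + 1 > rb.2 then rb.1 + 1 else rb.2)
        else ((1 : Int), rb.2)) ((1 : Int), (1 : Int))
    (h, if rb.2 > 4 then st.2 + (rb.2 - 4) else st.2)

def calcular_huecos_y_continuo_alt (asignacion : List (String × String)) : Int × Int :=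
  pvSalas.foldl (pvStepB (pvBuckets asignacion)) (0, 0)

-- ===== PRECONDITION & SPEC =====
-- Pre_ excludes exactly the inputs where A raises KeyError: an entry whose sala is one of
-- the six known salas but whose franja is not in franjas (B raises there too).
def Pre_calcular_huecos_y_continuo (asignacion : List (String × String)) : Prop :=
  ∀ p ∈ asignacion, p.1 ∈ pvSalas → p.2 ∈ pvFranjas
instance (asignacion : List (String × String)) : Decidable (Pre_calcular_huecos_y_continuo asignacion) := by
  unfold Pre_calcular_huecos_y_continuo; infer_instance
def pvWitness_calcular_huecos_y_continuo : (List (String × String)) :=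
  [("Sala1", "F2"), ("Sala1", "F4"), ("Sala7", "X"), ("Sala2", "F1")]

def Spec_calcular_huecos_y_continuo (asignacion : List (String × String)) (out : Int × Int) : Prop :=
  out = calcular_huecos_y_continuo_alt asignacion
instance (asignacion : List (String × String)) (out : Int × Int) : Decidable (Spec_calcular_huecos_y_continuo asignacion out) := by
  unfold Spec_calcular_huecos_y_continuo; infer_instance

-- ===== CLAIM (what is proved, stated in full; the proofs are below) =====
def Claim_equal_calcular_huecos_y_continuo : Prop := ∀ (asignacion : List (String × String)), Dom_calcular_huecos_y_continuo asignacion → Pre_calcular_huecos_y_continuo asignacion → Spec_calcular_huecos_y_continuo asignacion (calcular_huecos_y_continuo asignacion)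

-- ===== LEMMAS AND PROOFS =====

-- a loop guarded by 'if p x' is the loop over the filtered list
theorem pvFoldl_ite_filter {α β : Type} (p : α → Bool) (f : β → α → β) (l : List α) (b : β) :
    l.foldl (fun acc x => if p x then f acc x else acc) b = (l.filter p).foldl f b := by
  induction l generalizing b with
  | nil => rfl
  | cons x t ih => by_cases h : p x <;> simp [h, ih]

-- indexing below the length of the left part ignores the appended tail
theorem pvGetD_prefix (zs ws : List Int) (j : Int) (h0 : 0 ≤ j) (h : j < (zs.length : Int)) :
    PySem.List.pyGetD (zs ++ ws) j 0 = PySem.List.pyGetD zs j 0 := by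
  rw [PySem.List.pyGetD_eq_getElem (zs ++ ws) 0 h0 (by simp only [List.length_append]; push_cast; omega),
      PySem.List.pyGetD_eq_getElem zs 0 h0 h]
  exact List.getElem_append_left (by omega)

-- common shape of both adjacent-pair scans
def pvScan {σ : Type} (f : σ → Int → Int → σ) : σ → Int → List Int → σ
  | st, _, [] => st
  | st, prev, x :: xs => pvScan f (f st prev x) x xs

theorem pvScan_append {σ : Type} (f : σ → Int → Int → σ) (t : List Int) (a prev : Int) (st : σ) :
    pvScan f st prev (t ++ [a]) = f (pvScan f st prev t) ((prev :: t).getLast (by simp)) a := by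
  induction t generalizing prev st with
  | nil => rfl
  | cons x t ih => simp [pvScan, ih, List.getLast]

-- B's zip loop is pvScan
theorem pvZip_scan {σ : Type} (f : σ → Int → Int → σ) (t : List Int) (prev : Int) (st : σ) :
    ((prev :: t).zip t).foldl (fun st p => f st p.1 p.2) st = pvScan f st prev t := by
  induction t generalizing prev st with
  | nil => rfl
  | cons x t ih => simp only [List.zip_cons_cons, List.foldl_cons]; exact ih x (f st prev x)

-- the last two entries of (prev :: zs) ++ [a]
theorem pvGetD_penult (zs : List Int) (prev a : Int) :
    PySem.List.pyGetD (prev :: (zs ++ [a])) ((zs.length : Int)) 0 = (prev :: zs).getLast (by simp) := by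
  rw [← List.cons_append,
      pvGetD_prefix (prev :: zs) [a] _ (by omega) (by simp only [List.length_cons]; push_cast; omega),
      PySem.List.pyGetD_eq_getElem (prev :: zs) 0 (by omega) (by simp only [List.length_cons]; push_cast; omega),
      List.getLast_eq_getElem]
  congr 1

theorem pvGetD_last (zs : List Int) (prev a : Int) :
    PySem.List.pyGetD (prev :: (zs ++ [a])) ((zs.length : Int) + 1) 0 = a := by
  rw [← List.cons_append,
      PySem.List.pyGetD_eq_getElem ((prev :: zs) ++ [a]) 0 (by omega)
        (by simp only [List.length_append, List.length_cons]; push_cast; omega)]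
  exact List.getElem_concat_length (by simp only [List.length_cons]; omega) _

-- A's index loop over range(1, n) is pvScan
theorem pvIdx1_scan {σ : Type} (g : σ → Int → Int → σ) (t : List Int) (prev : Int) (st : σ) :
    (PySem.List.pyRange 1 (((prev :: t).length : Int)) 1).foldl
      (fun st i => g st (PySem.List.pyGetD (prev :: t) (i - 1) 0) (PySem.List.pyGetD (prev :: t) i 0)) st
    = pvScan g st prev t := by
  induction t using List.reverseRecOn generalizing st with
  | nil => simp [PySem.List.pyRange_one_eq_nil, pvScan]
  | append_singleton zs a ih =>
    have hlen : (((prev :: (zs ++ [a])).length : Int)) = ((zs.length : Int) + 1) + 1 := by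
      simp only [List.length_cons, List.length_append, List.length_nil]; push_cast; omega
    rw [hlen, PySem.List.pyRange_one_succ_right (by omega), List.foldl_append]
    have hpre : (PySem.List.pyRange 1 ((zs.length : Int) + 1) 1).foldl
        (fun st i => g st (PySem.List.pyGetD (prev :: (zs ++ [a])) (i - 1) 0)
          (PySem.List.pyGetD (prev :: (zs ++ [a])) i 0)) st
        = (PySem.List.pyRange 1 ((zs.length : Int) + 1) 1).foldl
        (fun st i => g st (PySem.List.pyGetD (prev :: zs) (i - 1) 0)
          (PySem.List.pyGetD (prev :: zs) i 0)) st := by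
      apply PySem.List.foldl_congr_mem
      intro acc i hi
      rw [PySem.List.mem_pyRange_one] at hi
      rw [← List.cons_append,
          pvGetD_prefix (prev :: zs) [a] _ (by omega) (by simp only [List.length_cons]; push_cast; omega),
          pvGetD_prefix (prev :: zs) [a] _ (by omega) (by simp only [List.length_cons]; push_cast; omega)]
    have hIH := ih st
    rw [show (((prev :: zs).length : Int)) = (zs.length : Int) + 1 by
      simp only [List.length_cons]; push_cast; omega] at hIH
    rw [hpre, hIH, pvScan_append]
    simp only [List.foldl_cons, List.foldl_nil]
    rw [show ((zs.length : Int) + 1) - 1 = ((zs.length : Int)) by omega,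
        pvGetD_penult, pvGetD_last]

-- A's index loop over range(0, n-1) is pvScan
theorem pvIdx0_scan {σ : Type} (g : σ → Int → Int → σ) (t : List Int) (prev : Int) (st : σ) :
    (PySem.List.pyRange 0 (((prev :: t).length : Int) - 1) 1).foldl
      (fun st i => g st (PySem.List.pyGetD (prev :: t) i 0) (PySem.List.pyGetD (prev :: t) (i + 1) 0)) st
    = pvScan g st prev t := by
  induction t using List.reverseRecOn generalizing st with
  | nil => simp [PySem.List.pyRange_one_eq_nil, pvScan]
  | append_singleton zs a ih =>
    have hlen : (((prev :: (zs ++ [a])).length : Int) - 1) = ((zs.length : Int)) + 1 := by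
      simp only [List.length_cons, List.length_append, List.length_nil]; push_cast; omega
    rw [hlen, PySem.List.pyRange_one_succ_right (by omega), List.foldl_append]
    have hpre : (PySem.List.pyRange 0 ((zs.length : Int)) 1).foldl
        (fun st i => g st (PySem.List.pyGetD (prev :: (zs ++ [a])) i 0)
          (PySem.List.pyGetD (prev :: (zs ++ [a])) (i + 1) 0)) st
        = (PySem.List.pyRange 0 ((zs.length : Int)) 1).foldl
        (fun st i => g st (PySem.List.pyGetD (prev :: zs) i 0)
          (PySem.List.pyGetD (prev :: zs) (i + 1) 0)) st := by
      apply PySem.List.foldl_congr_mem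
      intro acc i hi
      rw [PySem.List.mem_pyRange_one] at hi
      rw [← List.cons_append,
          pvGetD_prefix (prev :: zs) [a] _ (by omega) (by simp only [List.length_cons]; push_cast; omega),
          pvGetD_prefix (prev :: zs) [a] _ (by omega) (by simp only [List.length_cons]; push_cast; omega)]
    have hIH := ih st
    rw [show (((prev :: zs).length : Int) - 1) = ((zs.length : Int)) by
      simp only [List.length_cons]; push_cast; omega] at hIH
    rw [hpre, hIH, pvScan_append]
    simp only [List.foldl_cons, List.foldl_nil]
    rw [pvGetD_penult, pvGetD_last]

-- telescoping the gap sum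
theorem pvScan_gap (t : List Int) (prev st : Int) :
    pvScan (fun acc p c => acc + (c - p - 1)) st prev t
    = st + ((prev :: t).getLast (by simp) - prev - (t.length : Int)) := by
  induction t generalizing prev st with
  | nil => simp [pvScan]
  | cons x t ih => simp [pvScan, ih, List.getLast]; ring

-- A's (max_consecutivo, contador) scan is B's (run, best) scan with the components swapped
theorem pvScan_run (t : List Int) (prev : Int) (b r : Int) :
    pvScan (fun mc p c => if c == p + 1 then (max mc.1 (mc.2 + 1), mc.2 + 1) else (mc.1, (1 : Int)))
      (b, r) prev t
    = ((pvScan (fun rb p c => if c == p + 1 then (rb.1 + 1, if rb.1 + 1 > rb.2 then rb.1 + 1 else rb.2)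
        else ((1 : Int), rb.2)) (r, b) prev t).2,
       (pvScan (fun rb p c => if c == p + 1 then (rb.1 + 1, if rb.1 + 1 > rb.2 then rb.1 + 1 else rb.2)
        else ((1 : Int), rb.2)) (r, b) prev t).1) := by
  induction t generalizing prev b r with
  | nil => rfl
  | cons x t ih =>
    simp only [pvScan]
    cases h : (x == prev + 1) with
    | false =>
      simp only [Bool.false_eq_true, if_false]
      exact ih x b 1
    | true =>
      simp only [if_true]
      have hmax : max b (r + 1) = if r + 1 > b then r + 1 else b := by
        rw [max_def]; split_ifs <;> omega
      rw [hmax]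
      exact ih x (if r + 1 > b then r + 1 else b) (r + 1)

-- the bucket of a known sala is exactly A's filtered-and-mapped list
theorem pvBucket_eq (asignacion : List (String × String)) (sala : String) (h : sala ∈ pvSalas) :
    (pvBuckets asignacion).getD sala []
    = (asignacion.filter (fun q => q.1 == sala)).map (fun q => pvFranjasIdx.getD q.2 0) := by
  unfold pvBuckets
  rw [pvFoldl_ite_filter]
  rw [show (asignacion.filter (fun p => (PySem.Set.ofList pvSalas).contains p.1)).foldl
        (fun d p => d.modify p.1 [] (fun l => l ++ [pvFranjasIdx.getD p.2 0])) PySem.Dict.empty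
      = ((asignacion.filter (fun p => (PySem.Set.ofList pvSalas).contains p.1)).map
          (fun q => (q.1, pvFranjasIdx.getD q.2 0))).foldl
        (fun d p => d.modify p.1 [] (fun x => x ++ [p.2])) PySem.Dict.empty from by
      rw [List.foldl_map]]
  rw [PySem.Dict.getD_foldl_modify_append, PySem.Dict.getD_empty, List.nil_append,
      List.filter_map, List.map_map]
  have h1 : (asignacion.filter (fun p => (PySem.Set.ofList pvSalas).contains p.1)).filter
      ((fun p => p.1 == sala) ∘ fun q => (q.1, pvFranjasIdx.getD q.2 0))
      = asignacion.filter (fun q => q.1 == sala) := by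
    rw [show ((fun p => p.1 == sala) ∘ fun q => (q.1, pvFranjasIdx.getD q.2 0))
        = (fun (q : String × String) => q.1 == sala) from rfl]
    rw [List.filter_filter]
    apply List.filter_congr
    intro a _
    cases hc : (a.1 == sala) with
    | false => simp
    | true =>
      have : a.1 = sala := by exact eq_of_beq hc
      simp [PySem.Set.contains, PySem.Set.mem_ofList, this, h]
  rw [h1]
  rfl

-- per-sala steps agree
theorem pvStep_eq (asignacion : List (String × String)) (st : Int × Int) (sala : String)
    (h : sala ∈ pvSalas) :
    pvStepA asignacion st sala = pvStepB (pvBuckets asignacion) st sala := by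
  unfold pvStepA pvStepB
  rw [pvBucket_eq asignacion sala h]
  dsimp only
  generalize PySem.List.sorted
      ((asignacion.filter (fun q => q.1 == sala)).map (fun q => pvFranjasIdx.getD q.2 0))
      (fun x => x) false = ys
  cases ys with
  | nil => simp
  | cons prev t =>
    simp only [List.cons_ne_nil, if_false, List.tail_cons, Prod.mk.injEq]
    rw [pvIdx0_scan (fun acc p c => acc + (c - p - 1)) t prev st.1, pvScan_gap,
        pvIdx1_scan (fun mc p c =>
          if c == p + 1 then (max mc.1 (mc.2 + 1), mc.2 + 1) else (mc.1, (1 : Int))) t prev,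
        pvZip_scan (fun rb p c =>
          if c == p + 1 then (rb.1 + 1, if rb.1 + 1 > rb.2 then rb.1 + 1 else rb.2)
          else ((1 : Int), rb.2)) t prev,
        pvScan_run,
        PySem.List.pyGetD_neg_one _ _ (List.cons_ne_nil prev t), PySem.List.pyGetD_zero_cons]
    constructor
    · simp only [List.length_cons]
      push_cast
      ring
    · rfl

-- ===== VERDICT (by name: the statement is the Claim_ definition above) =====
theorem calcular_huecos_y_continuo_spec : Claim_equal_calcular_huecos_y_continuo := by
  intro asignacion _ _
  unfold Spec_calcular_huecos_y_continuo calcular_huecos_y_continuo calcular_huecos_y_continuo_alt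
  exact PySem.List.foldl_congr_mem _ _ _ _ (fun st sala hs => pvStep_eq asignacion st sala hs)
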